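-- pv_equiv track=rewrite | github.com/tachyonlabs/CodePath-Alumni-Professional-Interview-Prep-Course | interviewbit-bit-manipulation-different-bits-sum-pairwise.py | cntBits
-- ===== SOURCE A (Python) =====
-- def cntBits(A):
--     bits = []
--     for i in range(32):
--         bit = 0
--         for num in A:
--             if num & 2 ** i:
--                 bit += 1
--
--         bits.append(bit)
--
--     return sum((len(A) - bit) * bit * 2 for bit in bits) % (10 ** 9 + 7)
-- ===== SOURCE B (Python) =====
-- def cntBits(A):
--     total = 0
--     for a in A:
--         for b in A:
--             total += bin((a ^ b) & 0xFFFFFFFF).count("1")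
--     return total % (10 ** 9 + 7)
-- ===== Notes on version B (the rewrite author's own statement) =====
-- stated objective: alternative
-- what changed: A counts, per bit position 0..31, how many elements have that bit set and sums the closed form 2*c*(n-c); B instead directly double-loops over all ordered pairs and adds the popcount of (a ^ b) & 0xFFFFFFFF, taking the modulus once at the end.
import Mathlib
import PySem

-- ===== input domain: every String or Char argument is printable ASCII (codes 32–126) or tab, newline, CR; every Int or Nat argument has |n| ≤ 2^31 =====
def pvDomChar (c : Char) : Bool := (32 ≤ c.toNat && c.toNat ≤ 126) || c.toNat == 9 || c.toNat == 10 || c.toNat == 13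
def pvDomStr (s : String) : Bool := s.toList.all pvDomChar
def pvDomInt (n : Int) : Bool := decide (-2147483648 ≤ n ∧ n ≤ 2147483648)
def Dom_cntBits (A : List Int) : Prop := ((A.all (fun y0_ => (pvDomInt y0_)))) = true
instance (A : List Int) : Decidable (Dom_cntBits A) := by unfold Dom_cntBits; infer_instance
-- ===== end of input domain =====

-- B replaces A's per-bit counting pass (32 bit-columns, then a closed-form pair count per column)
-- by the direct pairwise sum of popcounts of (a ^ b) & 0xFFFFFFFF over all ordered pairs; objective: alternative (B is not faster).

-- ===== PORT A =====
def cntBits (A : List Int) : Int :=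
  PySem.Int.mod
    ((((PySem.List.pyRange 0 32 1).foldl
        (fun bits i =>
          bits ++ [A.foldl (fun bit num => if PySem.Int.band num ((2:Int) ^ i.toNat) ≠ 0 then bit + 1 else bit) 0])
        []).map (fun bit => ((A.length : Int) - bit) * bit * 2)).sum)
    (10 ^ 9 + 7)

-- ===== PORT B =====
-- bin(x).count("1") on the nonnegative masked value is Python's popcount: ported as PySem.Int.bitCount (Python-exact).
def cntBits_alt (A : List Int) : Int :=
  PySem.Int.mod
    (A.foldl (fun total a =>
      A.foldl (fun total b =>
        total + (PySem.Int.bitCount (PySem.Int.band (PySem.Int.bxor a b) 4294967295) : Int)) total) 0)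
    (10 ^ 9 + 7)

-- ===== PRECONDITION & SPEC =====
def Spec_cntBits (A : List Int) (out : Int) : Prop := out = cntBits_alt A
instance (A : List Int) (out : Int) : Decidable (Spec_cntBits A out) := by unfold Spec_cntBits; infer_instance

-- ===== CLAIM (what is proved, stated in full; the proofs are below) =====
def Claim_equal_cntBits : Prop := ∀ (A : List Int), Dom_cntBits A → Spec_cntBits A (cntBits A)

-- ===== LEMMAS AND PROOFS =====

-- low 32 bits of an integer, as a natural number (Python's x & 0xFFFFFFFF)
def pvU (x : Int) : Nat := (x % 4294967296).toNat

-- bit i of the low-32-bit window of x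
def pvQ (i : Nat) (x : Int) : Bool := Nat.testBit (pvU x) i

theorem pvU_lt (x : Int) : pvU x < 4294967296 := by unfold pvU; omega

theorem pvQ_pos (i : Nat) (x : Int) (hx : 0 ≤ x) (hi : i < 32) :
    pvQ i x = Nat.testBit x.toNat i := by
  have h : pvU x = x.toNat % 2 ^ 32 := by unfold pvU; omega
  unfold pvQ
  rw [h, Nat.testBit_mod_two_pow]
  simp [hi]

theorem pvQ_neg (i : Nat) (x : Int) (hx : x < 0) (hi : i < 32) :
    pvQ i x = !Nat.testBit (-x - 1).toNat i := by
  have h : pvU x = 2 ^ 32 - ((-x - 1).toNat % 2 ^ 32 + 1) := by unfold pvU; omega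
  have hlt : (-x - 1).toNat % 2 ^ 32 < 2 ^ 32 := Nat.mod_lt _ (by norm_num)
  unfold pvQ
  rw [h, Nat.testBit_two_pow_sub_succ hlt, Nat.testBit_mod_two_pow]
  simp [hi]

-- Python's x & 0xFFFFFFFF is the low-32-bit window
theorem pv_band_mask (x : Int) : PySem.Int.band x 4294967295 = ((pvU x : Nat) : Int) := by
  rw [PySem.Int.band.eq_1]
  by_cases hx : 0 ≤ x
  · simp only [hx, if_true, show (0:Int) ≤ 4294967295 by norm_num, if_true]
    have : x.toNat &&& (4294967295 : Int).toNat = x.toNat % 2 ^ 32 := by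
      have : (4294967295 : Int).toNat = 2 ^ 32 - 1 := by decide
      rw [this, Nat.and_two_pow_sub_one_eq_mod]
    rw [this]; unfold pvU; omega
  · simp only [hx, if_false, show (0:Int) ≤ 4294967295 by norm_num, if_true]
    have : (4294967295 : Int).toNat &&& (-x - 1).toNat = (-x - 1).toNat % 2 ^ 32 := by
      have : (4294967295 : Int).toNat = 2 ^ 32 - 1 := by decide
      rw [this, Nat.and_comm, Nat.and_two_pow_sub_one_eq_mod]
    rw [this]; unfold pvU; omega

-- A's test `num & 2**i != 0` reads exactly bit i of the low-32-bit window
theorem pv_band_two_pow (x : Int) (i : Nat) (hi : i < 32) :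
    (PySem.Int.band x ((2:Int) ^ i) ≠ 0) ↔ pvQ i x = true := by
  have hp : ((2:Int) ^ i) = ((2 ^ i : Nat) : Int) := by push_cast; ring
  rw [PySem.Int.band.eq_1]
  by_cases hx : 0 ≤ x
  · simp only [hx, if_true, show (0:Int) ≤ (2:Int) ^ i by positivity, if_true]
    rw [show ((2:Int) ^ i).toNat = 2 ^ i by rw [hp, Int.toNat_natCast], Nat.and_two_pow, pvQ_pos i x hx hi]
    cases h : Nat.testBit x.toNat i <;> simp [h]
  · simp only [hx, if_false, show (0:Int) ≤ (2:Int) ^ i by positivity, if_true]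
    rw [show ((2:Int) ^ i).toNat = 2 ^ i by rw [hp, Int.toNat_natCast], Nat.and_comm, Nat.and_two_pow,
        pvQ_neg i x (by omega) hi]
    cases h : Nat.testBit (-x - 1).toNat i <;> simp [h]

-- bit i (i < 32) of a ^ b is the xor of the bits of a and b
theorem pvQ_bxor (a b : Int) (i : Nat) (hi : i < 32) :
    pvQ i (PySem.Int.bxor a b) = (pvQ i a != pvQ i b) := by
  rw [PySem.Int.bxor.eq_1]
  by_cases ha : 0 ≤ a <;> by_cases hb : 0 ≤ b
  · simp only [ha, hb, if_true]
    rw [pvQ_pos i _ (by positivity) hi, pvQ_pos i a ha hi, pvQ_pos i b hb hi]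
    simp [Nat.testBit_xor]
  · simp only [ha, hb, if_true, if_false]
    have hz : -(((a.toNat ^^^ (-b - 1).toNat : Nat) : Int)) - 1 < 0 := by omega
    rw [pvQ_neg i _ hz hi, pvQ_pos i a ha hi, pvQ_neg i b (by omega) hi]
    have hm : (-(-(((a.toNat ^^^ (-b - 1).toNat : Nat) : Int)) - 1) - 1).toNat
        = a.toNat ^^^ (-b - 1).toNat := by omega
    rw [hm, Nat.testBit_xor]
    cases Nat.testBit a.toNat i <;> cases Nat.testBit (-b - 1).toNat i <;> rfl
  · simp only [ha, hb, if_true, if_false]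
    have hz : -((((-a - 1).toNat ^^^ b.toNat : Nat) : Int)) - 1 < 0 := by omega
    rw [pvQ_neg i _ hz hi, pvQ_neg i a (by omega) hi, pvQ_pos i b hb hi]
    have hm : (-(-((((-a - 1).toNat ^^^ b.toNat : Nat) : Int)) - 1) - 1).toNat
        = (-a - 1).toNat ^^^ b.toNat := by omega
    rw [hm, Nat.testBit_xor]
    cases Nat.testBit (-a - 1).toNat i <;> cases Nat.testBit b.toNat i <;> rfl
  · simp only [ha, hb, if_false]
    rw [pvQ_pos i _ (by positivity) hi, pvQ_neg i a (by omega) hi, pvQ_neg i b (by omega) hi]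
    rw [Int.toNat_natCast, Nat.testBit_xor]
    cases Nat.testBit (-a - 1).toNat i <;> cases Nat.testBit (-b - 1).toNat i <;> rfl

-- popcount of a natural below 2^k is the sum of its first k bits
theorem pv_bitCount_eq_sum (k : Nat) : ∀ n : Nat, n < 2 ^ k →
    ((PySem.Int.bitCount (n : Int) : Nat) : Int)
      = ((List.range k).map (fun i => if Nat.testBit n i then (1:Int) else 0)).sum := by
  induction k with
  | zero =>
    intro n hn
    interval_cases n
    simp [PySem.Int.bitCount_natCast_zero]
  | succ k ih =>
    intro n hn
    by_cases h0 : n = 0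
    · subst h0; simp [PySem.Int.bitCount_natCast_zero, Nat.zero_testBit]
    · rw [PySem.Int.bitCount_natCast (Nat.pos_of_ne_zero h0)]
      rw [List.range_succ_eq_map]
      simp only [List.map_cons, List.map_map, List.sum_cons]
      have hrec := ih (n / 2) (by omega)
      have hbits : ((List.range k).map ((fun i => if Nat.testBit n i then (1:Int) else 0) ∘ Nat.succ)).sum
          = ((List.range k).map (fun i => if Nat.testBit (n / 2) i then (1:Int) else 0)).sum := by
        congr 1
        apply List.map_congr_left
        intro i _
        simp [Function.comp, Nat.testBit_add_one]
      rw [hbits, ← hrec]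
      have : (if Nat.testBit n 0 then (1:Int) else 0) = ((n % 2 : Nat) : Int) := by
        rw [Nat.testBit_zero]; rcases Nat.mod_two_eq_zero_or_one n with h | h <;> simp [h]
      rw [this]
      push_cast
      ring

-- ===== generic list-sum lemmas =====

theorem pv_foldl_append {γ : Type} (l : List γ) (f : γ → Int) :
    ∀ acc : List Int, l.foldl (fun a x => a ++ [f x]) acc = acc ++ l.map f := by
  induction l with
  | nil => intro acc; simp
  | cons x l ih => intro acc; simp [ih]

theorem pv_foldl_add {γ : Type} (l : List γ) (g : γ → Int) :
    ∀ init : Int, l.foldl (fun t x => t + g x) init = init + (l.map g).sum := by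
  induction l with
  | nil => intro init; simp
  | cons x l ih => intro init; simp [ih]; ring

theorem pv_sum_map_add {γ : Type} (l : List γ) (f g : γ → Int) :
    (l.map (fun x => f x + g x)).sum = (l.map f).sum + (l.map g).sum := by
  induction l with
  | nil => simp
  | cons x l ih => simp [ih]; ring

theorem pv_foldl_nested (A : List Int) (g : Int → Int → Int) (l : List Int) :
    ∀ init : Int,
      l.foldl (fun t a => A.foldl (fun t b => t + g a b) t) init
        = init + (l.map (fun a => (A.map (g a)).sum)).sum := by
  induction l with
  | nil => intro init; simp
  | cons a l ih =>
    intro init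
    simp only [List.foldl_cons, List.map_cons, List.sum_cons, ih, pv_foldl_add]
    ring

theorem pv_sum_comm {γ δ : Type} (l₁ : List γ) (l₂ : List δ) (f : γ → δ → Int) :
    (l₁.map (fun a => (l₂.map (f a)).sum)).sum
      = (l₂.map (fun b => (l₁.map (fun a => f a b)).sum)).sum := by
  induction l₁ with
  | nil => simp
  | cons a l₁ ih =>
    simp only [List.map_cons, List.sum_cons, ih]
    rw [← pv_sum_map_add]

-- ===== counting lemmas =====

theorem pv_count_fold (i : Nat) (hi : i < 32) (l : List Int) :
    ∀ acc : Int,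
      l.foldl (fun bit num => if PySem.Int.band num ((2:Int) ^ i) ≠ 0 then bit + 1 else bit) acc
        = acc + (l.countP (fun num => pvQ i num) : Int) := by
  induction l with
  | nil => intro acc; simp
  | cons x l ih =>
    intro acc
    simp only [List.foldl_cons, List.countP_cons]
    by_cases h : pvQ i x = true
    · rw [if_pos ((pv_band_two_pow x i hi).mpr h)]
      rw [ih]; simp [h]; push_cast; ring
    · rw [if_neg (fun hc => h ((pv_band_two_pow x i hi).mp hc))]
      rw [ih]; simp [h]

-- inner pair sum for one bit: over b ∈ l, differing bits against a fixed a
theorem pv_inner_sum (i : Nat) (a : Int) (l : List Int) :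
    (l.map (fun b => if pvQ i a != pvQ i b then (1:Int) else 0)).sum
      = if pvQ i a then (l.length : Int) - (l.countP (fun num => pvQ i num) : Int)
        else (l.countP (fun num => pvQ i num) : Int) := by
  induction l with
  | nil => simp
  | cons b l ih =>
    simp only [List.map_cons, List.sum_cons, ih, List.countP_cons, List.length_cons]
    cases ha : pvQ i a <;> cases hb : pvQ i b <;> simp [ha, hb] <;> push_cast <;> ring

theorem pv_outer_sum (q : Int → Bool) (K₁ K₂ : Int) (l : List Int) :
    (l.map (fun a => if q a then K₁ else K₂)).sum
      = (l.countP q : Int) * K₁ + ((l.length : Int) - (l.countP q : Int)) * K₂ := by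
  induction l with
  | nil => simp
  | cons a l ih =>
    simp only [List.map_cons, List.sum_cons, ih, List.countP_cons, List.length_cons]
    cases h : q a <;> simp [h] <;> push_cast <;> ring

-- per-bit closed form for the pairwise differing-bit count
theorem pv_per_bit (i : Nat) (A : List Int) :
    (A.map (fun a => (A.map (fun b => if pvQ i a != pvQ i b then (1:Int) else 0)).sum)).sum
      = ((A.length : Int) - (A.countP (fun num => pvQ i num) : Int))
          * (A.countP (fun num => pvQ i num) : Int) * 2 := by
  have h1 : (A.map (fun a => (A.map (fun b => if pvQ i a != pvQ i b then (1:Int) else 0)).sum)).sum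
      = (A.map (fun a => if pvQ i a then (A.length : Int) - (A.countP (fun num => pvQ i num) : Int)
          else (A.countP (fun num => pvQ i num) : Int))).sum := by
    congr 1; apply List.map_congr_left; intro a _; exact pv_inner_sum i a A
  rw [h1, pv_outer_sum]
  ring

-- the pointwise popcount identity used for B
theorem pv_pointwise (a b : Int) :
    ((PySem.Int.bitCount (PySem.Int.band (PySem.Int.bxor a b) 4294967295) : Nat) : Int)
      = ((List.range 32).map (fun i => if pvQ i a != pvQ i b then (1:Int) else 0)).sum := by
  rw [pv_band_mask]
  rw [pv_bitCount_eq_sum 32 (pvU (PySem.Int.bxor a b)) (pvU_lt _)]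
  congr 1
  apply List.map_congr_left
  intro i hi
  rw [List.mem_range] at hi
  rw [show Nat.testBit (pvU (PySem.Int.bxor a b)) i = pvQ i (PySem.Int.bxor a b) from rfl,
      pvQ_bxor a b i hi]

-- ===== VERDICT (by name: the statement is the Claim_ definition above) =====
set_option maxHeartbeats 4000000 in
theorem cntBits_spec : Claim_equal_cntBits := by
  intro A _
  unfold Spec_cntBits
  have hA : cntBits A = PySem.Int.mod
      (((List.range 32).map (fun k =>
        ((A.length : Int) - (A.countP (fun num => pvQ k num) : Int))
          * (A.countP (fun num => pvQ k num) : Int) * 2)).sum) (10 ^ 9 + 7) := by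
    unfold cntBits
    rw [PySem.List.pyRange_one, show ((32 : Int) - 0).toNat = 32 by rfl, List.foldl_map,
        show (fun (bits : List Int) (k : Nat) => bits ++
          [A.foldl (fun bit num => if PySem.Int.band num ((2:Int) ^ ((0 : Int) + (k : Int)).toNat) ≠ 0
            then bit + 1 else bit) 0])
        = (fun (bits : List Int) (k : Nat) => bits ++
          [A.foldl (fun bit num => if PySem.Int.band num ((2:Int) ^ k) ≠ 0 then bit + 1 else bit) 0])
        from by funext bits k; rw [show ((0 : Int) + (k : Int)).toNat = k by omega],
        pv_foldl_append, List.nil_append]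
    rw [List.map_map]
    have hmap : (List.range 32).map ((fun bit => ((A.length : Int) - bit) * bit * 2) ∘
          (fun k => A.foldl (fun bit num => if PySem.Int.band num ((2:Int) ^ k) ≠ 0 then bit + 1 else bit) 0))
        = (List.range 32).map (fun k =>
            ((A.length : Int) - (A.countP (fun num => pvQ k num) : Int))
              * (A.countP (fun num => pvQ k num) : Int) * 2) := by
      apply List.map_congr_left
      intro k hk
      rw [List.mem_range] at hk
      simp only [Function.comp]
      rw [pv_count_fold k hk A 0, zero_add]
    rw [hmap]
  have hB : cntBits_alt A = PySem.Int.mod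
      (((List.range 32).map (fun k =>
        ((A.length : Int) - (A.countP (fun num => pvQ k num) : Int))
          * (A.countP (fun num => pvQ k num) : Int) * 2)).sum) (10 ^ 9 + 7) := by
    unfold cntBits_alt
    rw [pv_foldl_nested A (fun a b => (PySem.Int.bitCount (PySem.Int.band (PySem.Int.bxor a b) 4294967295) : Int)) A 0, zero_add]
    have h1 : (A.map (fun a => (A.map (fun b =>
        (PySem.Int.bitCount (PySem.Int.band (PySem.Int.bxor a b) 4294967295) : Int))).sum)).sum
        = (A.map (fun a => (A.map (fun b =>
            ((List.range 32).map (fun i => if pvQ i a != pvQ i b then (1:Int) else 0)).sum)).sum)).sum :=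
      congrArg List.sum (List.map_congr_left (fun a _ =>
        congrArg List.sum (List.map_congr_left (fun b _ => pv_pointwise a b))))
    have h2 : (A.map (fun a => (A.map (fun b =>
        ((List.range 32).map (fun i => if pvQ i a != pvQ i b then (1:Int) else 0)).sum)).sum)).sum
        = (A.map (fun a => ((List.range 32).map (fun i =>
            (A.map (fun b => if pvQ i a != pvQ i b then (1:Int) else 0)).sum)).sum)).sum :=
      congrArg List.sum (List.map_congr_left (fun a _ =>
        pv_sum_comm A (List.range 32) (fun b i => if pvQ i a != pvQ i b then (1:Int) else 0)))
    have h3 : (A.map (fun a => ((List.range 32).map (fun i =>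
          (A.map (fun b => if pvQ i a != pvQ i b then (1:Int) else 0)).sum)).sum)).sum
        = ((List.range 32).map (fun i => (A.map (fun a =>
            (A.map (fun b => if pvQ i a != pvQ i b then (1:Int) else 0)).sum)).sum)).sum :=
      pv_sum_comm A (List.range 32)
        (fun a i => (A.map (fun b => if pvQ i a != pvQ i b then (1:Int) else 0)).sum)
    have h4 : ((List.range 32).map (fun i => (A.map (fun a =>
          (A.map (fun b => if pvQ i a != pvQ i b then (1:Int) else 0)).sum)).sum)).sum
        = ((List.range 32).map (fun i =>
            ((A.length : Int) - (A.countP (fun num => pvQ i num) : Int))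
              * (A.countP (fun num => pvQ i num) : Int) * 2)).sum :=
      congrArg List.sum (List.map_congr_left (fun i _ => pv_per_bit i A))
    rw [h1, h2, h3, h4]
  rw [hA, hB]
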